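-- pv_equiv track=rewrite | github.com/justinjhjung/st_algorithm | greedy/greedy_6137.py | solve
-- ===== SOURCE A (Python) =====
-- def solve(N, S):
--     a = 0
--     b = N-1
--     ans = ''
--     while a <= b:
--         sub_s = S[a:b+1]
--         if sub_s < sub_s[::-1]:
--             ans += S[a]
--             a += 1
--         else:
--             ans += S[b]
--             b -= 1
--     return ans
-- ===== SOURCE B (Python) =====
-- def solve(N, S):
--     # Interval DP: best(a, L) = lexicographically smallest string obtainable from the
--     # window S[a:a+L] by repeatedly removing either end character; computed bottom-up
--     # over window lengths.  The answer is best(0, N).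
--     if N <= 0:
--         return ''
--     prev = [''] * (N + 1)          # row for windows of length 0
--     for L in range(1, N + 1):
--         prev = [min(S[a] + prev[a + 1], S[a + L - 1] + prev[a])
--                 for a in range(0, N - L + 1)]
--     return prev[0]
-- ===== Notes on version B (the rewrite author's own statement) =====
-- stated objective: alternative
-- what changed: B discards A's greedy entirely and computes the answer as an exhaustive bottom-up interval DP: for every window length it tabulates the lexicographically smallest string obtainable from each window of S by repeatedly removing either end (min of the two end-removal choices), returning the table entry for the whole string; it trades speed for directness (the DP builds every window's optimum, A only follows one greedy path).
import Mathlib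
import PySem

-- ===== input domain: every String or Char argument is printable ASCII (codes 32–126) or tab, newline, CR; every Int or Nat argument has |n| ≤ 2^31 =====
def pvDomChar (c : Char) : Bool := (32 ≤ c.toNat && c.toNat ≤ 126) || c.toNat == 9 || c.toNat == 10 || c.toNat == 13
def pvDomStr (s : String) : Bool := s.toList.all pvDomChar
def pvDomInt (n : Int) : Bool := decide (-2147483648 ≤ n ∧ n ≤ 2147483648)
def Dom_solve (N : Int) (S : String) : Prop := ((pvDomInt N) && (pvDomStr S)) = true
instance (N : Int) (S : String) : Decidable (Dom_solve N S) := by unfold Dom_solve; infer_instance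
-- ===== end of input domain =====

-- B replaces A's greedy (compare the window with its reverse each step) by an exhaustive
-- bottom-up interval DP: smallest string obtainable from each window by end removals.

-- ===== PORT A =====
-- while a <= b: sub_s = S[a:b+1]; if sub_s < sub_s[::-1]: take front else take back.
-- sub_s[::-1] is ported as .reverse; Python's str '<' is Lean's '<' on List Char;
-- ans += S[k] accumulates a List Char, wrapped by String.ofList.
def solveLoopA (cs : List Char) (a b : Int) (ans : List Char) : List Char :=
  if a ≤ b then
    if PySem.List.slice cs (some a) (some (b + 1)) <
       (PySem.List.slice cs (some a) (some (b + 1))).reverse then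
      solveLoopA cs (a + 1) b (ans ++ [PySem.List.pyGetD cs a ' '])
    else
      solveLoopA cs a (b - 1) (ans ++ [PySem.List.pyGetD cs b ' '])
  else ans
termination_by (b + 1 - a).toNat
decreasing_by all_goals omega

def solve (N : Int) (S : String) : String :=
  String.ofList (solveLoopA S.toList 0 (N - 1) [])

-- ===== PORT B =====
-- one DP row step: [min(S[a] + prev[a+1], S[a+L-1] + prev[a]) for a in range(0, N-L+1)]
-- (Python's min(x, y) returns x on ties, exactly Lean's `min` = `if x ≤ y then x else y`)
def pvStepB (cs : List Char) (N : Int) (prev : List (List Char)) (L : Int) : List (List Char) :=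
  (PySem.List.pyRange 0 (N - L + 1) 1).map (fun a =>
    min (PySem.List.pyGetD cs a ' ' :: PySem.List.pyGetD prev (a + 1) [])
        (PySem.List.pyGetD cs (a + L - 1) ' ' :: PySem.List.pyGetD prev a []))

-- if N <= 0: return ''; prev = ['']*(N+1); for L in range(1, N+1): prev = <row>; return prev[0]
def solve_alt (N : Int) (S : String) : String :=
  if N ≤ 0 then "" else
    String.ofList (PySem.List.pyGetD
      ((PySem.List.pyRange 1 (N + 1) 1).foldl (pvStepB S.toList N)
        (List.replicate (N.toNat + 1) ([] : List Char)))
      0 [])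

-- ===== PRECONDITION & SPEC =====
-- Both Pythons raise IndexError exactly when 1 ≤ N and N > len(S); Pre_ excludes those inputs.
def Pre_solve (N : Int) (S : String) : Prop := N ≤ (S.toList.length : Int)
instance (N : Int) (S : String) : Decidable (Pre_solve N S) := by unfold Pre_solve; infer_instance
def pvWitness_solve : Int × String := (3, "cba")

def Spec_solve (N : Int) (S : String) (out : String) : Prop := out = solve_alt N S
instance (N : Int) (S : String) (out : String) : Decidable (Spec_solve N S out) := by unfold Spec_solve; infer_instance

-- ===== CLAIM (what is proved, stated in full; the proofs are below) =====
def Claim_equal_solve : Prop := ∀ (N : Int) (S : String), Dom_solve N S → Pre_solve N S → Spec_solve N S (solve N S)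

-- ===== LEMMAS AND PROOFS =====

-- ---- generic list/lex helpers ----

lemma pv_getD (cs : List Char) (k : Nat) (h : k < cs.length) :
    PySem.List.pyGetD cs (k : Int) ' ' = cs[k] := by
  rw [PySem.List.pyGetD_eq_getElem cs ' ' (by omega) (by exact_mod_cast h)]
  simp

lemma pv_cons_le_iff (a b : Char) (l m : List Char) :
    (a :: l ≤ b :: m) ↔ a < b ∨ (a = b ∧ l ≤ m) := by
  rw [← not_lt, List.cons_lt_cons_iff]
  constructor
  · intro h
    rcases lt_trichotomy a b with h1 | h1 | h1
    · exact Or.inl h1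
    · exact Or.inr ⟨h1, by rw [← not_lt]; intro hlt; exact h (Or.inr ⟨h1.symm, hlt⟩)⟩
    · exact absurd (Or.inl h1) h
  · rintro (h1 | ⟨rfl, h2⟩)
    · rintro (h3 | ⟨rfl, h3⟩)
      · exact absurd h1 (lt_asymm h3)
      · exact lt_irrefl _ h1
    · rintro (h3 | ⟨-, h3⟩)
      · exact lt_irrefl _ h3
      · exact absurd h3 (not_lt.mpr h2)

lemma pv_cons_le_same (a : Char) (l m : List Char) (h : l ≤ m) : a :: l ≤ a :: m :=
  (pv_cons_le_iff a a l m).mpr (Or.inr ⟨rfl, h⟩)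

lemma pv_cons_le_of_lt (a b : Char) (l m : List Char) (h : a < b) : a :: l ≤ b :: m :=
  (pv_cons_le_iff a b l m).mpr (Or.inl h)

lemma pv_append_lt_append (u v w : List Char) (h : u.length = v.length) :
    (u ++ w < v ++ w) ↔ u < v := by
  induction u generalizing v with
  | nil =>
    cases v with
    | nil =>
      constructor
      · intro h'; exact absurd h' (lt_irrefl w)
      · intro h'; exact absurd h' (lt_irrefl ([] : List Char))
    | cons d v' => simp at h
  | cons c u' ih =>
    cases v with
    | nil => simp at h
    | cons d v' =>
      simp only [List.cons_append, List.cons_lt_cons_iff]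
      rw [ih v' (by simpa using h)]

lemma pv_getLastD_append (l₁ L : List Char) (b d : Char) :
    (l₁ ++ (L ++ [b])).getLastD d = b := by
  rw [← List.append_assoc]; exact List.getLastD_concat

lemma pv_dropLast_append (l₁ L : List Char) (b : Char) :
    (l₁ ++ (L ++ [b])).dropLast = l₁ ++ L := by
  rw [← List.append_assoc]; exact List.dropLast_concat ..

-- ---- the greedy (A's algorithm, abstract) and the DP optimum (B's), as functions of a window ----

def pvG : List Char → List Char
  | [] => []
  | c :: rest =>
    if (c :: rest) < (c :: rest).reverse then c :: pvG rest
    else (c :: rest).getLastD ' ' :: pvG ((c :: rest).dropLast)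
termination_by w => w.length
decreasing_by
  · simp
  · simp [List.length_dropLast]

def pvBest : List Char → List Char
  | [] => []
  | c :: rest =>
    if (c :: pvBest rest) ≤ ((c :: rest).getLastD ' ' :: pvBest ((c :: rest).dropLast))
    then c :: pvBest rest
    else (c :: rest).getLastD ' ' :: pvBest ((c :: rest).dropLast)
termination_by w => w.length
decreasing_by
  · simp
  · simp [List.length_dropLast]

lemma pvG_nil : pvG [] = [] := by rw [pvG]

lemma pvG_cons (c : Char) (rest : List Char) :
    pvG (c :: rest) =
      if (c :: rest) < (c :: rest).reverse then c :: pvG rest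
      else (c :: rest).getLastD ' ' :: pvG ((c :: rest).dropLast) := by
  rw [pvG]

lemma pvBest_nil : pvBest [] = [] := by rw [pvBest]

lemma pvBest_cons_min (c : Char) (rest : List Char) :
    pvBest (c :: rest) =
      min (c :: pvBest rest) ((c :: rest).getLastD ' ' :: pvBest ((c :: rest).dropLast)) := by
  rw [pvBest]; exact (min_def _ _).symm

lemma pvBest_le_left (c : Char) (rest : List Char) :
    pvBest (c :: rest) ≤ c :: pvBest rest := by
  rw [pvBest_cons_min]; exact min_le_left _ _

lemma pvBest_le_right (c : Char) (rest : List Char) :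
    pvBest (c :: rest) ≤ (c :: rest).getLastD ' ' :: pvBest ((c :: rest).dropLast) := by
  rw [pvBest_cons_min]; exact min_le_right _ _

lemma pvBest_eq_or (c : Char) (rest : List Char) :
    pvBest (c :: rest) = c :: pvBest rest ∨
    pvBest (c :: rest) = (c :: rest).getLastD ' ' :: pvBest ((c :: rest).dropLast) := by
  rw [pvBest_cons_min]; exact min_choice _ _

-- pvBest is invariant under reversing the window
lemma pvBest_reverse : ∀ (n : Nat) (w : List Char), w.length ≤ n → pvBest w.reverse = pvBest w := by
  intro n
  induction n with
  | zero =>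
    intro w hw
    have : w = [] := List.eq_nil_of_length_eq_zero (by omega)
    subst this; simp
  | succ n ih =>
    intro w hw
    cases w with
    | nil => simp
    | cons c rest =>
      rcases rest.eq_nil_or_concat' with rfl | ⟨mid, l, rfl⟩
      · simp
      · have hrev : (c :: (mid ++ [l])).reverse = l :: (mid.reverse ++ [c]) := by simp
        have h1 : (c :: (mid ++ [l])).getLastD ' ' = l := by
          rw [show c :: (mid ++ [l]) = (c :: mid) ++ [l] from rfl]
          exact List.getLastD_concat
        have h2 : (c :: (mid ++ [l])).dropLast = c :: mid := by
          rw [show c :: (mid ++ [l]) = (c :: mid) ++ [l] from rfl]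
          exact List.dropLast_concat ..
        have h3 : (l :: (mid.reverse ++ [c])).getLastD ' ' = c := by
          rw [show l :: (mid.reverse ++ [c]) = (l :: mid.reverse) ++ [c] from rfl]
          exact List.getLastD_concat
        have h4 : (l :: (mid.reverse ++ [c])).dropLast = l :: mid.reverse := by
          rw [show l :: (mid.reverse ++ [c]) = (l :: mid.reverse) ++ [c] from rfl]
          exact List.dropLast_concat ..
        have hlen : mid.length + 1 ≤ n := by simp at hw; omega
        have e1 : pvBest (mid.reverse ++ [c]) = pvBest (c :: mid) := by
          rw [show mid.reverse ++ [c] = (c :: mid).reverse from by simp]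
          exact ih _ (by simp; omega)
        have e2 : pvBest (l :: mid.reverse) = pvBest (mid ++ [l]) := by
          rw [show l :: mid.reverse = (mid ++ [l]).reverse from by simp]
          exact ih _ (by simp; omega)
        rw [hrev, pvBest_cons_min, pvBest_cons_min, h1, h2, h3, h4, e1, e2]
        exact min_comm _ _

-- the exchange lemma: a window reading ≤ its reverse gives the ≤ DP value, common suffix T
lemma pvB_key : ∀ (n : Nat) (M T : List Char), (M ++ T).length ≤ n → M ≤ M.reverse →
    pvBest (M ++ T) ≤ pvBest (M.reverse ++ T) := by
  intro n
  induction n with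
  | zero =>
    intro M T hlen hle
    have hM : M = [] := by cases M with | nil => rfl | cons a r => simp at hlen
    subst hM; simp
  | succ n ih =>
    intro M T hlen hle
    by_cases hr : M.reverse ≤ M
    · rw [le_antisymm hr hle]
    · have hlt : M < M.reverse := not_le.mp hr
      rcases T.eq_nil_or_concat' with rfl | ⟨T0, tl, rfl⟩
      · rw [List.append_nil, List.append_nil, pvBest_reverse M.length M (le_refl _)]
      · cases M with
        | nil => rw [List.reverse_nil] at hlt; exact absurd hlt (lt_irrefl _)
        | cons m0 rest =>
          rcases rest.eq_nil_or_concat' with rfl | ⟨mid, l, rfl⟩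
          · rw [show ([m0] : List Char).reverse = [m0] from by simp] at hlt
            exact absurd hlt (lt_irrefl _)
          · have hrev : (m0 :: (mid ++ [l])).reverse = l :: (mid.reverse ++ [m0]) := by simp
            have hlt' : m0 :: (mid ++ [l]) < l :: (mid.reverse ++ [m0]) := by
              rw [hrev] at hlt; exact hlt
            have hcl := List.cons_lt_cons_iff.mp hlt'
            have hL := hlen
            simp only [List.length_append, List.length_cons] at hL
            have hu_left : pvBest ((m0 :: (mid ++ [l])) ++ (T0 ++ [tl]))
                ≤ m0 :: pvBest ((mid ++ [l]) ++ (T0 ++ [tl])) :=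
              pvBest_le_left m0 ((mid ++ [l]) ++ (T0 ++ [tl]))
            have hu_right : pvBest ((m0 :: (mid ++ [l])) ++ (T0 ++ [tl]))
                ≤ tl :: pvBest ((m0 :: (mid ++ [l])) ++ T0) := by
              have h := pvBest_le_right m0 ((mid ++ [l]) ++ (T0 ++ [tl]))
              have e1 : (m0 :: ((mid ++ [l]) ++ (T0 ++ [tl]))).getLastD ' ' = tl := by
                rw [show m0 :: ((mid ++ [l]) ++ (T0 ++ [tl]))
                    = (m0 :: (mid ++ [l])) ++ (T0 ++ [tl]) from rfl]
                exact pv_getLastD_append ..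
              have e2 : (m0 :: ((mid ++ [l]) ++ (T0 ++ [tl]))).dropLast
                  = (m0 :: (mid ++ [l])) ++ T0 := by
                rw [show m0 :: ((mid ++ [l]) ++ (T0 ++ [tl]))
                    = (m0 :: (mid ++ [l])) ++ (T0 ++ [tl]) from rfl]
                exact pv_dropLast_append ..
              rwa [e1, e2] at h
            have hxv : pvBest ((m0 :: (mid ++ [l])) ++ (T0 ++ [tl]))
                ≤ l :: pvBest ((mid.reverse ++ [m0]) ++ (T0 ++ [tl])) := by
              rcases hcl with h1 | ⟨heq, h2⟩
              · exact le_trans hu_left (pv_cons_le_of_lt _ _ _ _ h1)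
              · subst heq
                have hmm : mid < mid.reverse :=
                  (pv_append_lt_append mid mid.reverse [m0] (by simp)).mp h2
                have ihm : pvBest (mid ++ ([m0] ++ (T0 ++ [tl])))
                    ≤ pvBest (mid.reverse ++ ([m0] ++ (T0 ++ [tl]))) :=
                  ih mid ([m0] ++ (T0 ++ [tl])) (by simp; omega) (le_of_lt hmm)
                have e3 : (mid ++ [m0]) ++ (T0 ++ [tl]) = mid ++ ([m0] ++ (T0 ++ [tl])) := by simp
                have e4 : (mid.reverse ++ [m0]) ++ (T0 ++ [tl])
                    = mid.reverse ++ ([m0] ++ (T0 ++ [tl])) := by simp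
                exact le_trans hu_left (pv_cons_le_same _ _ _ (by rw [e3, e4]; exact ihm))
            have hyv : pvBest ((m0 :: (mid ++ [l])) ++ (T0 ++ [tl]))
                ≤ tl :: pvBest ((l :: (mid.reverse ++ [m0])) ++ T0) := by
              have ih2 : pvBest ((m0 :: (mid ++ [l])) ++ T0)
                  ≤ pvBest ((m0 :: (mid ++ [l])).reverse ++ T0) :=
                ih _ T0 (by simp; omega) hle
              rw [hrev] at ih2
              exact le_trans hu_right (pv_cons_le_same _ _ _ ih2)
            have hv_eq : (m0 :: (mid ++ [l])).reverse ++ (T0 ++ [tl])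
                = l :: ((mid.reverse ++ [m0]) ++ (T0 ++ [tl])) := by rw [hrev]; rfl
            rw [hv_eq]
            rcases pvBest_eq_or l ((mid.reverse ++ [m0]) ++ (T0 ++ [tl])) with hv | hv
            · rw [hv]; exact hxv
            · have e5 : (l :: ((mid.reverse ++ [m0]) ++ (T0 ++ [tl]))).getLastD ' ' = tl := by
                rw [show l :: ((mid.reverse ++ [m0]) ++ (T0 ++ [tl]))
                    = (l :: (mid.reverse ++ [m0])) ++ (T0 ++ [tl]) from rfl]
                exact pv_getLastD_append ..
              have e6 : (l :: ((mid.reverse ++ [m0]) ++ (T0 ++ [tl]))).dropLast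
                  = (l :: (mid.reverse ++ [m0])) ++ T0 := by
                rw [show l :: ((mid.reverse ++ [m0]) ++ (T0 ++ [tl]))
                    = (l :: (mid.reverse ++ [m0])) ++ (T0 ++ [tl]) from rfl]
                exact pv_dropLast_append ..
              rw [hv, e5, e6]
              exact hyv

-- the greedy equals the DP optimum
lemma pvBest_eq_pvG : ∀ (n : Nat) (w : List Char), w.length ≤ n → pvBest w = pvG w := by
  intro n
  induction n with
  | zero =>
    intro w hw
    have : w = [] := List.eq_nil_of_length_eq_zero (by omega)
    subst this; rw [pvBest_nil, pvG_nil]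
  | succ n ih =>
    intro w hw
    cases w with
    | nil => rw [pvBest_nil, pvG_nil]
    | cons c rest =>
      rcases rest.eq_nil_or_concat' with rfl | ⟨mid, l, rfl⟩
      · rw [pvBest_cons_min, pvG_cons]
        have hnot : ¬ ([c] : List Char) < ([c] : List Char).reverse := by
          rw [List.reverse_singleton]; exact lt_irrefl _
        rw [if_neg hnot]
        simp [pvBest_nil, pvG_nil]
      · have hL := hw
        simp only [List.length_cons, List.length_append] at hL
        have hlast : (c :: (mid ++ [l])).getLastD ' ' = l := by
          rw [show c :: (mid ++ [l]) = (c :: mid) ++ [l] from rfl]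
          exact List.getLastD_concat
        have hdrop : (c :: (mid ++ [l])).dropLast = c :: mid := by
          rw [show c :: (mid ++ [l]) = (c :: mid) ++ [l] from rfl]
          exact List.dropLast_concat ..
        have hrev : (c :: (mid ++ [l])).reverse = l :: (mid.reverse ++ [c]) := by simp
        rw [pvBest_cons_min, pvG_cons, hlast, hdrop, hrev]
        rcases lt_trichotomy c l with hcl | hcl | hcl
        · -- take front on both sides
          have hw' : c :: (mid ++ [l]) < l :: (mid.reverse ++ [c]) :=
            List.cons_lt_cons_iff.mpr (Or.inl hcl)
          rw [if_pos hw',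
            min_eq_left (pv_cons_le_of_lt _ _ _ _ hcl),
            ih (mid ++ [l]) (by simp; omega)]
        · -- equal ends
          subst hcl
          have hcond : (c :: (mid ++ [c]) < c :: (mid.reverse ++ [c])) ↔ mid < mid.reverse := by
            rw [List.cons_lt_cons_iff]
            constructor
            · rintro (h | ⟨-, h⟩)
              · exact absurd h (lt_irrefl _)
              · exact (pv_append_lt_append mid mid.reverse [c] (by simp)).mp h
            · intro h
              exact Or.inr ⟨rfl, (pv_append_lt_append mid mid.reverse [c] (by simp)).mpr h⟩
          have hsym : pvBest (mid.reverse ++ [c]) = pvBest (c :: mid) := by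
            rw [show mid.reverse ++ [c] = (c :: mid).reverse from by simp]
            exact pvBest_reverse (mid.length + 1) (c :: mid) (by simp)
          by_cases hm : mid < mid.reverse
          · rw [if_pos (hcond.mpr hm)]
            have hkey : pvBest (mid ++ [c]) ≤ pvBest (c :: mid) := by
              rw [← hsym]
              exact pvB_key (mid.length + 1) mid [c] (by simp) (le_of_lt hm)
            rw [min_eq_left (pv_cons_le_same _ _ _ hkey),
              ih (mid ++ [c]) (by simp; omega)]
          · rw [if_neg (fun h => hm (hcond.mp h))]
            have hkey : pvBest (c :: mid) ≤ pvBest (mid ++ [c]) := by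
              have h := pvB_key (mid.length + 1) mid.reverse [c] (by simp)
                (by rw [List.reverse_reverse]; exact not_lt.mp hm)
              rw [List.reverse_reverse] at h
              rw [← hsym]
              exact h
            rw [min_eq_right (pv_cons_le_same _ _ _ hkey),
              ih (c :: mid) (by simp; omega)]
        · -- take back on both sides
          have hw' : ¬ c :: (mid ++ [l]) < l :: (mid.reverse ++ [c]) := by
            rw [List.cons_lt_cons_iff]
            rintro (h | ⟨h, -⟩)
            · exact absurd h (lt_asymm hcl)
            · exact absurd h.symm (ne_of_lt hcl)
          rw [if_neg hw',
            min_eq_right (pv_cons_le_of_lt _ _ _ _ hcl),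
            ih (c :: mid) (by simp; omega)]

-- ---- the A-side loop computes pvG of the remaining window ----

def pvSegI (cs : List Char) (a b : Int) : List Char :=
  (cs.drop a.toNat).take (b + 1 - a).toNat

lemma pvSegI_nil (cs : List Char) (a b : Int) (h : b < a) : pvSegI cs a b = [] := by
  unfold pvSegI
  rw [show (b + 1 - a).toNat = 0 from by omega]
  simp

lemma pvSegI_cons (cs : List Char) (a b : Int) (h0 : 0 ≤ a) (hab : a ≤ b)
    (hb : b < (cs.length : Int)) :
    pvSegI cs a b = cs[a.toNat]'(by omega) :: pvSegI cs (a + 1) b := by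
  unfold pvSegI
  have ha : a.toNat < cs.length := by omega
  rw [List.drop_eq_getElem_cons ha,
    show (b + 1 - a).toNat = (b + 1 - (a + 1)).toNat + 1 from by omega,
    List.take_succ_cons,
    show (a + 1).toNat = a.toNat + 1 from by omega]

lemma pvSegI_snoc (cs : List Char) (a b : Int) (h0 : 0 ≤ a) (hab : a ≤ b)
    (hb : b < (cs.length : Int)) :
    pvSegI cs a b = pvSegI cs a (b - 1) ++ [cs[b.toNat]'(by omega)] := by
  unfold pvSegI
  rw [show (b + 1 - a).toNat = (b - a).toNat + 1 from by omega,
    show (b - 1 + 1 - a).toNat = (b - a).toNat from by omega,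
    List.take_add_one]
  have hx : (cs.drop a.toNat)[(b - a).toNat]? = some (cs[b.toNat]'(by omega)) := by
    rw [List.getElem?_drop, show a.toNat + (b - a).toNat = b.toNat from by omega,
      List.getElem?_eq_getElem (by omega)]
  rw [hx]
  simp

lemma pvLoopA_eq (cs : List Char) : ∀ (n : Nat) (a b : Int) (ans : List Char),
    (b + 1 - a).toNat ≤ n → 0 ≤ a → b < (cs.length : Int) →
    solveLoopA cs a b ans = ans ++ pvG (pvSegI cs a b) := by
  intro n
  induction n with
  | zero =>
    intro a b ans hn ha hb
    rw [solveLoopA, if_neg (by omega : ¬ a ≤ b), pvSegI_nil cs a b (by omega), pvG_nil,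
      List.append_nil]
  | succ n ih =>
    intro a b ans hn ha hb
    rw [solveLoopA]
    by_cases hab : a ≤ b
    · rw [if_pos hab]
      have hseg : PySem.List.slice cs (some a) (some (b + 1)) = pvSegI cs a b := by
        rw [show a = ((a.toNat : Nat) : Int) from by omega,
          show b + 1 = ((b.toNat + 1 : Nat) : Int) from by omega,
          PySem.List.slice_natCast]
        unfold pvSegI
        congr 1
        omega
      have hcons : pvSegI cs a b = cs[a.toNat]'(by omega) :: pvSegI cs (a + 1) b :=
        pvSegI_cons cs a b ha hab hb
      have hlast : (pvSegI cs a b).getLastD ' ' = cs[b.toNat]'(by omega) := by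
        rw [pvSegI_snoc cs a b ha hab hb]; exact List.getLastD_concat
      have hdrop : (pvSegI cs a b).dropLast = pvSegI cs a (b - 1) := by
        rw [pvSegI_snoc cs a b ha hab hb]; exact List.dropLast_concat ..
      have hG : pvG (pvSegI cs a b) =
          if pvSegI cs a b < (pvSegI cs a b).reverse
          then cs[a.toNat]'(by omega) :: pvG (pvSegI cs (a + 1) b)
          else cs[b.toNat]'(by omega) :: pvG (pvSegI cs a (b - 1)) := by
        conv_lhs => rw [hcons, pvG_cons, ← hcons]
        rw [hlast, hdrop]
      have hga : PySem.List.pyGetD cs a ' ' = cs[a.toNat]'(by omega) :=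
        PySem.List.pyGetD_eq_getElem cs ' ' ha (by omega)
      have hgb : PySem.List.pyGetD cs b ' ' = cs[b.toNat]'(by omega) :=
        PySem.List.pyGetD_eq_getElem cs ' ' (by omega) hb
      rw [hseg, hG]
      by_cases hc : pvSegI cs a b < (pvSegI cs a b).reverse
      · rw [if_pos hc, if_pos hc, ih (a + 1) b _ (by omega) (by omega) hb, hga]
        simp
      · rw [if_neg hc, if_neg hc, ih a (b - 1) _ (by omega) ha (by omega), hgb]
        simp
    · rw [if_neg hab, pvSegI_nil cs a b (by omega), pvG_nil, List.append_nil]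

-- ---- the B-side fold computes pvBest of every window, row by row ----

def pvWnd (cs : List Char) (a L : Nat) : List Char := (cs.drop a).take L

def pvRow (cs : List Char) (n K : Nat) : List (List Char) :=
  (List.range (n - K + 1)).map (fun a => pvBest (pvWnd cs a K))

lemma pvWnd_cons (cs : List Char) (a L : Nat) (h : a < cs.length) :
    pvWnd cs a (L + 1) = cs[a] :: pvWnd cs (a + 1) L := by
  unfold pvWnd
  rw [List.drop_eq_getElem_cons h, List.take_succ_cons]

lemma pvWnd_snoc (cs : List Char) (a L : Nat) (h : a + L < cs.length) :
    pvWnd cs a (L + 1) = pvWnd cs a L ++ [cs[a + L]] := by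
  unfold pvWnd
  rw [List.take_add_one]
  have hx : (cs.drop a)[L]? = some (cs[a + L]) := by
    rw [List.getElem?_drop, List.getElem?_eq_getElem h]
  rw [hx]
  simp

lemma pvStep_row (cs : List Char) (n' K : Nat) (hK : K + 1 ≤ n') (hn : n' ≤ cs.length) :
    pvStepB cs (n' : Int) (pvRow cs n' K) ((K + 1 : Nat) : Int) = pvRow cs n' (K + 1) := by
  have hrowget : ∀ (j : Nat), j < n' - K + 1 →
      PySem.List.pyGetD (pvRow cs n' K) ((j : Nat) : Int) [] = pvBest (pvWnd cs j K) := by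
    intro j hj
    rw [PySem.List.pyGetD_natCast]
    unfold pvRow
    rw [List.getD_eq_getElem _ _ (by simpa using hj)]
    simp
  unfold pvStepB
  conv_rhs => unfold pvRow
  rw [PySem.List.pyRange_one,
    show (((n' : Int) - ((K + 1 : Nat) : Int) + 1) - 0).toNat = n' - (K + 1) + 1 from by
      push_cast; omega,
    List.map_map]
  apply List.map_congr_left
  intro k hk
  have hk' : k < n' - (K + 1) + 1 := List.mem_range.mp hk
  have hklen : k < cs.length := by omega
  have hkK : k + K < cs.length := by omega
  simp only [Function.comp_apply, zero_add]
  have g1 : PySem.List.pyGetD cs ((k : Nat) : Int) ' ' = cs[k] := pv_getD cs k hklen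
  have g2 : PySem.List.pyGetD (pvRow cs n' K) ((k : Int) + 1) [] = pvBest (pvWnd cs (k + 1) K) := by
    rw [show ((k : Int) + 1) = (((k + 1 : Nat)) : Int) from by push_cast; omega]
    exact hrowget (k + 1) (by omega)
  have g3 : PySem.List.pyGetD cs ((k : Int) + ((K + 1 : Nat) : Int) - 1) ' ' = cs[k + K] := by
    rw [show ((k : Int) + ((K + 1 : Nat) : Int) - 1) = (((k + K : Nat)) : Int) from by
      push_cast; omega]
    exact pv_getD cs (k + K) hkK
  have g4 : PySem.List.pyGetD (pvRow cs n' K) ((k : Nat) : Int) [] = pvBest (pvWnd cs k K) :=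
    hrowget k (by omega)
  rw [g1, g2, g3, g4, pvWnd_cons cs k K hklen, pvBest_cons_min]
  have hlast : (cs[k] :: pvWnd cs (k + 1) K).getLastD ' ' = cs[k + K] := by
    rw [← pvWnd_cons cs k K hklen, pvWnd_snoc cs k K hkK]
    exact List.getLastD_concat
  have hdrop : (cs[k] :: pvWnd cs (k + 1) K).dropLast = pvWnd cs k K := by
    rw [← pvWnd_cons cs k K hklen, pvWnd_snoc cs k K hkK]
    exact List.dropLast_concat ..
  rw [hlast, hdrop]

lemma pvFold (cs : List Char) (n' : Nat) (hn : n' ≤ cs.length) : ∀ (k : Nat), k ≤ n' →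
    (PySem.List.pyRange (((n' - k : Nat) : Int) + 1) ((n' : Int) + 1) 1).foldl
      (pvStepB cs (n' : Int)) (pvRow cs n' (n' - k)) = pvRow cs n' n' := by
  intro k
  induction k with
  | zero =>
    intro _
    rw [show ((n' - 0 : Nat) : Int) + 1 = (n' : Int) + 1 from by norm_num,
      PySem.List.pyRange_one_eq_nil (le_refl _), List.foldl_nil,
      show n' - 0 = n' from by omega]
  | succ k ih =>
    intro hk1
    rw [PySem.List.pyRange_one_cons (by omega), List.foldl_cons,
      show (((n' - (k + 1) : Nat) : Int) + 1) = (((n' - (k + 1) + 1 : Nat)) : Int) from by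
        omega,
      pvStep_row cs n' (n' - (k + 1)) (by omega) hn,
      show n' - (k + 1) + 1 = n' - k from by omega]
    exact ih (by omega)

lemma pvRow_zero (cs : List Char) (n' : Nat) :
    pvRow cs n' 0 = List.replicate (n' + 1) ([] : List Char) := by
  unfold pvRow
  have h1 : ∀ a ∈ List.range (n' - 0 + 1), pvBest (pvWnd cs a 0) = (fun _ => ([] : List Char)) a := by
    intro a _
    unfold pvWnd
    rw [List.take_zero, pvBest_nil]
  rw [List.map_congr_left h1, List.map_const', List.length_range,
    show n' - 0 + 1 = n' + 1 from by omega]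

-- ===== VERDICT (by name: the statement is the Claim_ definition above) =====
theorem solve_spec : Claim_equal_solve := by
  intro N S _ hpre
  unfold Pre_solve at hpre
  unfold Spec_solve solve solve_alt
  by_cases hN : N ≤ 0
  · rw [if_pos hN, solveLoopA, if_neg (by omega : ¬ (0 : Int) ≤ N - 1)]
  · rw [if_neg hN]
    set cs := S.toList with hcs
    set n' := N.toNat with hn'
    have hNn : ((n' : Nat) : Int) = N := by omega
    have hA : solveLoopA cs 0 (N - 1) [] = pvG (pvSegI cs 0 (N - 1)) := by
      have h := pvLoopA_eq cs (N - 1 + 1 - 0).toNat 0 (N - 1) [] (le_refl _) (le_refl _)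
        (by omega)
      simpa using h
    have hseg : pvSegI cs 0 (N - 1) = cs.take n' := by
      unfold pvSegI
      rw [show ((0 : Int)).toNat = 0 from rfl, List.drop_zero,
        show (N - 1 + 1 - 0).toNat = n' from by omega]
    have hfold := pvFold cs n' (by omega) n' (le_refl _)
    rw [show n' - n' = 0 from by omega, pvRow_zero,
      show (((0 : Nat)) : Int) + 1 = (1 : Int) from by norm_num, hNn] at hfold
    have hfin : pvRow cs n' n' = [pvBest (pvWnd cs 0 n')] := by
      unfold pvRow
      rw [show n' - n' + 1 = 1 from by omega]
      simp
    have hwin : pvWnd cs 0 n' = cs.take n' := by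
      unfold pvWnd
      rw [List.drop_zero]
    rw [hA, hseg, hfold, hfin, PySem.List.pyGetD_zero_cons, hwin]
    rw [pvBest_eq_pvG (cs.take n').length _ (le_refl _)]
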